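-- pv_equiv track=rewrite | github.com/fp-computer-programming/cycle10-practice-quiz-p22jdiao | cycle-10_practice-quiz.py | matching_color
-- ===== SOURCE A (Python) =====
-- def matching_color(l1, l2):
--     new = [[],[],[],[]]
--     for i,v in enumerate(l1):
--         if l2[i] == "red":
--             new[0].append(l1[i] + ": " + l2[i])
--         elif l2[i] == "green":
--             new[1].append(l1[i] + ": " + l2[i])
--         elif l2[i] == "blue":
--             new[2].append(l1[i] + ": " + l2[i])
--         elif l2[i] == "yellow":
--             new[3].append(l1[i] + ": " + l2[i])
--
--     return new
-- ===== SOURCE B (Python) =====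
-- def matching_color(l1, l2):
--     return [[l1[i] + ": " + l2[i] for i in range(len(l1)) if l2[i] == color]
--             for color in ["red", "green", "blue", "yellow"]]
-- ===== Notes on version B (the rewrite author's own statement) =====
-- stated objective: simpler
-- what changed: Replaces the single pass with a 4-way branch and mutable buckets by one independent filtering comprehension per color over the fixed color list.
import Mathlib
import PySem

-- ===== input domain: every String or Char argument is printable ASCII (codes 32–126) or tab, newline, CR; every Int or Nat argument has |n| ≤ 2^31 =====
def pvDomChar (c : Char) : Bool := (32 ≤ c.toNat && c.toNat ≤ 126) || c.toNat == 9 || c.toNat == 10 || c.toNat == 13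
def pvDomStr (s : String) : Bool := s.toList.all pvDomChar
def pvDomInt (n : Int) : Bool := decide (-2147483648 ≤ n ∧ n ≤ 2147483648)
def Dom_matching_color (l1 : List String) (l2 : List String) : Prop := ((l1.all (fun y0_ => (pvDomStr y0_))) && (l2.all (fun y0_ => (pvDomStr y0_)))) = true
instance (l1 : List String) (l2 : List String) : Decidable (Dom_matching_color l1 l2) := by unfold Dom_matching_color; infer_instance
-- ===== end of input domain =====

-- B replaces A's single dispatching pass (a 4-way branch appending into four mutable
-- buckets) by one independent filtering comprehension per color: simpler.

-- ===== PORT A =====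
-- A's loop state: the four buckets new[0]..new[3].
abbrev pvQuad := List String × List String × List String × List String

-- one iteration of A's for-loop (iv = (i, v) from enumerate(l1))
def pvStepA (l1 l2 : List String) (acc : pvQuad) (iv : Int × String) : pvQuad :=
  let c := PySem.List.pyGetD l2 iv.1 ""
  if c == "red" then (acc.1 ++ [PySem.List.pyGetD l1 iv.1 "" ++ ": " ++ c], acc.2.1, acc.2.2.1, acc.2.2.2)
  else if c == "green" then (acc.1, acc.2.1 ++ [PySem.List.pyGetD l1 iv.1 "" ++ ": " ++ c], acc.2.2.1, acc.2.2.2)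
  else if c == "blue" then (acc.1, acc.2.1, acc.2.2.1 ++ [PySem.List.pyGetD l1 iv.1 "" ++ ": " ++ c], acc.2.2.2)
  else if c == "yellow" then (acc.1, acc.2.1, acc.2.2.1, acc.2.2.2 ++ [PySem.List.pyGetD l1 iv.1 "" ++ ": " ++ c])
  else acc

def matching_color (l1 : List String) (l2 : List String) : List (List String) :=
  let p := (PySem.List.enumerate l1 0).foldl (pvStepA l1 l2) ([], [], [], [])
  [p.1, p.2.1, p.2.2.1, p.2.2.2]

-- ===== PORT B =====
def matching_color_alt (l1 : List String) (l2 : List String) : List (List String) :=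
  ["red", "green", "blue", "yellow"].map (fun color =>
    ((PySem.List.pyRange 0 (l1.length : Int) 1).filter
        (fun i => PySem.List.pyGetD l2 i "" == color)).map
      (fun i => PySem.List.pyGetD l1 i "" ++ ": " ++ PySem.List.pyGetD l2 i ""))

-- ===== PRECONDITION & SPEC =====
-- Pre_ excludes exactly the inputs where Python A raises IndexError (l2 shorter than l1).
def Pre_matching_color (l1 : List String) (l2 : List String) : Prop := l1.length ≤ l2.length
instance (l1 : List String) (l2 : List String) : Decidable (Pre_matching_color l1 l2) := by unfold Pre_matching_color; infer_instance
def pvWitness_matching_color : List String × List String := (["a", "b"], ["red", "pink"])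

def Spec_matching_color (l1 : List String) (l2 : List String) (out : List (List String)) : Prop := out = matching_color_alt l1 l2
instance (l1 : List String) (l2 : List String) (out : List (List String)) : Decidable (Spec_matching_color l1 l2 out) := by unfold Spec_matching_color; infer_instance

-- ===== CLAIM (what is proved, stated in full; the proofs are below) =====
def Claim_equal_matching_color : Prop := ∀ (l1 : List String) (l2 : List String), Dom_matching_color l1 l2 → Pre_matching_color l1 l2 → Spec_matching_color l1 l2 (matching_color l1 l2)

-- ===== LEMMAS AND PROOFS =====

-- the canonical bucket both ports compute for one color
def pvBucket (c : String) (z : List (String × String)) : List String :=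
  (z.filter (fun p => p.2 == c)).map (fun p => p.1 ++ ": " ++ p.2)

lemma pvBucket_cons (c : String) (a b : String) (z : List (String × String)) :
    pvBucket c ((a, b) :: z) =
      (if b == c then [a ++ ": " ++ b] else []) ++ pvBucket c z := by
  by_cases h : b == c <;> simp [pvBucket, h]

lemma pvFoldA (l1 l2 : List String) (h : l1.length ≤ l2.length) :
    ∀ (n s : Nat) (acc : pvQuad), s + n = l1.length →
      (PySem.List.enumerate (l1.drop s) (s : Int)).foldl (pvStepA l1 l2) acc =
        (acc.1 ++ pvBucket "red" ((l1.drop s).zip (l2.drop s)),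
         acc.2.1 ++ pvBucket "green" ((l1.drop s).zip (l2.drop s)),
         acc.2.2.1 ++ pvBucket "blue" ((l1.drop s).zip (l2.drop s)),
         acc.2.2.2 ++ pvBucket "yellow" ((l1.drop s).zip (l2.drop s))) := by
  intro n
  induction n with
  | zero =>
      intro s acc hs
      have hd : l1.drop s = [] := List.drop_eq_nil_of_le (by omega)
      simp [hd, pvBucket]
  | succ m ih =>
      intro s acc hs
      have hs1 : s < l1.length := by omega
      have hs2 : s < l2.length := by omega
      have hd1 : l1.drop s = l1[s] :: l1.drop (s + 1) := (List.getElem_cons_drop hs1).symm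
      have hd2 : l2.drop s = l2[s] :: l2.drop (s + 1) := (List.getElem_cons_drop hs2).symm
      have hg1 : PySem.List.pyGetD l1 (s : Int) "" = l1[s] := by
        simp [List.getElem?_eq_getElem hs1]
      have hg2 : PySem.List.pyGetD l2 (s : Int) "" = l2[s] := by
        simp [List.getElem?_eq_getElem hs2]
      have ihs := ih (s + 1) (pvStepA l1 l2 acc ((s : Int), l1[s])) (by omega)
      rw [hd1, PySem.List.enumerate_cons, List.foldl_cons]
      have hcast : (s : Int) + 1 = ((s + 1 : Nat) : Int) := by push_cast; ring
      rw [hcast, ihs, hd2]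
      rcases acc with ⟨r, g, b, y⟩
      simp only [pvStepA, hg1, hg2, List.zip_cons_cons, pvBucket_cons]
      by_cases h1 : l2[s] == "red"
      · simp_all
      · by_cases h2 : l2[s] == "green"
        · simp_all
        · by_cases h3 : l2[s] == "blue"
          · simp_all
          · by_cases h4 : l2[s] == "yellow" <;> simp_all

lemma pvA_char (l1 l2 : List String) (h : l1.length ≤ l2.length) :
    matching_color l1 l2 =
      [pvBucket "red" (l1.zip l2), pvBucket "green" (l1.zip l2),
       pvBucket "blue" (l1.zip l2), pvBucket "yellow" (l1.zip l2)] := by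
  have := pvFoldA l1 l2 h l1.length 0 ([], [], [], []) (by omega)
  simp only [List.drop_zero, Int.natCast_zero] at this
  simp [matching_color, this]

lemma pvB_filter_char (c : String) :
    ∀ (l1 l2 : List String), l1.length ≤ l2.length →
      ((List.range l1.length).filter (fun k => l2.getD k "" == c)).map
          (fun k => l1.getD k "" ++ ": " ++ l2.getD k "") = pvBucket c (l1.zip l2) := by
  intro l1
  induction l1 with
  | nil => intro l2 h; simp [pvBucket]
  | cons x t ih =>
      intro l2 h
      cases l2 with
      | nil => simp at h
      | cons y u =>
          have hlen : t.length ≤ u.length := by simpa using h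
          rw [List.length_cons, List.range_succ_eq_map, List.filter_cons, List.filter_map]
          by_cases hy : y == c
          · simp only [List.getD_cons_zero, hy, if_true, List.map_cons, List.map_map,
              Function.comp_def, List.getD_cons_succ]
            rw [ih u hlen]
            simp [pvBucket_cons, hy]
          · simp only [List.getD_cons_zero, hy, if_false, Bool.false_eq_true, List.map_map,
              Function.comp_def, List.getD_cons_succ]
            rw [ih u hlen]
            simp [pvBucket_cons, hy]

lemma pvB_char (l1 l2 : List String) (h : l1.length ≤ l2.length) :
    matching_color_alt l1 l2 =
      [pvBucket "red" (l1.zip l2), pvBucket "green" (l1.zip l2),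
       pvBucket "blue" (l1.zip l2), pvBucket "yellow" (l1.zip l2)] := by
  have key : ∀ c : String,
      ((PySem.List.pyRange 0 (l1.length : Int) 1).filter
          (fun i => PySem.List.pyGetD l2 i "" == c)).map
        (fun i => PySem.List.pyGetD l1 i "" ++ ": " ++ PySem.List.pyGetD l2 i "") =
        pvBucket c (l1.zip l2) := by
    intro c
    rw [PySem.List.pyRange_zero_natCast, List.filter_map, List.map_map]
    simpa [Function.comp_def] using pvB_filter_char c l1 l2 h
  simp [matching_color_alt, key]

-- ===== VERDICT (by name: the statement is the Claim_ definition above) =====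
theorem matching_color_spec : Claim_equal_matching_color := by
  intro l1 l2 _ hpre
  unfold Spec_matching_color
  rw [pvA_char l1 l2 hpre, pvB_char l1 l2 hpre]
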